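-- pv_equiv track=rewrite | github.com/DPNT-Sourcecode/CHK-dzpc01 | lib/solutions/CHL/checklite_solution.py | checklite
-- ===== SOURCE A (Python) =====
-- from collections import defaultdict
--
-- def get_total(basket: dict[str, int]) -> int:
--     return (basket.get("A", 0) // 3 * 130 + basket.get("A", 0) % 3 * 50 +
--             basket.get("B", 0) // 2 * 45 + basket.get("B", 0) % 2 * 30 +
--             basket.get("C", 0) * 20 + basket.get("D", 0) * 15)
--
-- def checklite(skus: str) -> int:
--     skus = skus.upper().replace(' ', '')  # don't know the format yet
--     counts: dict[str, int] = defaultdict(int)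
--
--     for s in skus:
--         if s in "ABCD":
--             counts[s] += 1
--         else:
--             return -1
--
--     return get_total(counts)
-- ===== SOURCE B (Python) =====
-- def checklite(skus: str) -> int:
--     # Streaming marginal pricing: accumulate the price item by item; every 3rd A
--     # adds only 30 (3*50 - 130 discount) and every 2nd B adds only 15 (2*30 - 45).
--     total = 0
--     na = 0
--     nb = 0
--     for s in skus.upper().replace(' ', ''):
--         if s == 'A':
--             na += 1
--             total += 30 if na % 3 == 0 else 50
--         elif s == 'B':
--             nb += 1
--             total += 15 if nb % 2 == 0 else 30
--         elif s == 'C':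
--             total += 20
--         elif s == 'D':
--             total += 15
--         else:
--             return -1
--     return total
-- ===== Notes on version B (the rewrite author's own statement) =====
-- stated objective: alternative
-- what changed: Replaces A's tally-then-closed-formula design (build a defaultdict of counts, then price it) with a streaming marginal-pricing pass that never materialises counts-per-item prices: it adds each item's marginal price as it is scanned, charging 30 for every 3rd A and 15 for every 2nd B so the multibuy discount is applied online.
import Mathlib
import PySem

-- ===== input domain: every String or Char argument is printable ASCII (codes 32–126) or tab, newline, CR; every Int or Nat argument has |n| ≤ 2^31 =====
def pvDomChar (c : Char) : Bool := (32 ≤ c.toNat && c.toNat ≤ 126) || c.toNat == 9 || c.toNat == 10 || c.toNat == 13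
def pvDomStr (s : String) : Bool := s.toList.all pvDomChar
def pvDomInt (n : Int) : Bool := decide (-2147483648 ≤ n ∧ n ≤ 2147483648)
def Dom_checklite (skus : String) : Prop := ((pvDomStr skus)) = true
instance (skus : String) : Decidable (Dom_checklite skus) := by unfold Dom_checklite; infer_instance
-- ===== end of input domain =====

-- B replaces A's tally-then-closed-formula design (defaultdict of counts, then price it)
-- by a streaming marginal-pricing pass: each scanned item adds its marginal price, with
-- every 3rd A adding 30 and every 2nd B adding 15 (objective: alternative).

-- ===== PORT A =====
def pvGetTotal (basket : PySem.Dict Char Int) : Int :=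
  PySem.Int.floordiv (basket.getD 'A' 0) 3 * 130 + PySem.Int.mod (basket.getD 'A' 0) 3 * 50 +
  PySem.Int.floordiv (basket.getD 'B' 0) 2 * 45 + PySem.Int.mod (basket.getD 'B' 0) 2 * 30 +
  basket.getD 'C' 0 * 20 + basket.getD 'D' 0 * 15

def pvLoopA : List Char → PySem.Dict Char Int → Int
  | [], counts => pvGetTotal counts
  | s :: rest, counts =>
      if "ABCD".toList.contains s then pvLoopA rest (counts.modify s 0 (· + 1))
      else -1

def checklite (skus : String) : Int :=
  pvLoopA (PySem.Str.replace (PySem.Str.upper skus) " " "").toList PySem.Dict.empty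

-- ===== PORT B =====
def pvLoopB : List Char → Int → Int → Int → Int
  | [], total, _, _ => total
  | s :: rest, total, na, nb =>
      if s = 'A' then
        pvLoopB rest (total + if PySem.Int.mod (na + 1) 3 = 0 then 30 else 50) (na + 1) nb
      else if s = 'B' then
        pvLoopB rest (total + if PySem.Int.mod (nb + 1) 2 = 0 then 15 else 30) na (nb + 1)
      else if s = 'C' then pvLoopB rest (total + 20) na nb
      else if s = 'D' then pvLoopB rest (total + 15) na nb
      else -1

def checklite_alt (skus : String) : Int :=
  pvLoopB (PySem.Str.replace (PySem.Str.upper skus) " " "").toList 0 0 0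

-- ===== PRECONDITION & SPEC =====
def Spec_checklite (skus : String) (out : Int) : Prop := out = checklite_alt skus
instance (skus : String) (out : Int) : Decidable (Spec_checklite skus out) := by unfold Spec_checklite; infer_instance

-- ===== CLAIM (what is proved, stated in full; the proofs are below) =====
def Claim_equal_checklite : Prop := ∀ (skus : String), Dom_checklite skus → Spec_checklite skus (checklite skus)

-- ===== LEMMAS AND PROOFS =====

-- price of a single letter group, as A's closed formula computes it
def pvG (a : Int) : Int := PySem.Int.floordiv a 3 * 130 + PySem.Int.mod a 3 * 50
def pvH (b : Int) : Int := PySem.Int.floordiv b 2 * 45 + PySem.Int.mod b 2 * 30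

lemma pvG_step (n : Int) (_h : 0 ≤ n) :
    pvG (n + 1) = pvG n + (if PySem.Int.mod (n + 1) 3 = 0 then 30 else 50) := by
  unfold pvG
  simp only [PySem.Int.mod_eq_emod_of_pos (show (0:Int) < 3 by norm_num),
    PySem.Int.floordiv_eq_ediv_of_pos (show (0:Int) < 3 by norm_num)]
  split_ifs <;> omega

lemma pvH_step (n : Int) (_h : 0 ≤ n) :
    pvH (n + 1) = pvH n + (if PySem.Int.mod (n + 1) 2 = 0 then 15 else 30) := by
  unfold pvH
  simp only [PySem.Int.mod_eq_emod_of_pos (show (0:Int) < 2 by norm_num),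
    PySem.Int.floordiv_eq_ediv_of_pos (show (0:Int) < 2 by norm_num)]
  split_ifs <;> omega

lemma pvLoopA_eq (l : List Char) (d : PySem.Dict Char Int) :
    pvLoopA l d =
      if l.all (fun c => "ABCD".toList.contains c) then
        pvGetTotal (l.foldl (fun d x => d.modify x 0 (· + 1)) d)
      else -1 := by
  induction l generalizing d with
  | nil => simp [pvLoopA]
  | cons c rest ih =>
      simp only [pvLoopA, List.all_cons, List.foldl_cons]
      by_cases h : "ABCD".toList.contains c = true
      · rw [if_pos h, ih, h, Bool.true_and]
      · rw [if_neg h]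
        exact (if_neg (fun hh => h ((Bool.and_eq_true _ _).mp hh).1)).symm

lemma pvLoopB_eq (l : List Char) :
    ∀ (total na nb : Int), 0 ≤ na → 0 ≤ nb →
    pvLoopB l total na nb =
      if l.all (fun c => "ABCD".toList.contains c) then
        total + (pvG (na + l.count 'A') - pvG na) + (pvH (nb + l.count 'B') - pvH nb)
          + 20 * l.count 'C' + 15 * l.count 'D'
      else -1 := by
  induction l with
  | nil => intro total na nb _ _; simp [pvLoopB]
  | cons c rest ih =>
      intro total na nb hna hnb
      by_cases hA : c = 'A'
      · subst hA
        rw [pvLoopB, if_pos rfl, ih _ _ _ (by omega) hnb]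
        by_cases hall : rest.all (fun c => "ABCD".toList.contains c)
        · have hstep := pvG_step na hna
          rw [show na + 1 + (rest.count 'A' : Int) = na + ((rest.count 'A' : Int) + 1) from by ring] at *
          simp only [List.all_cons, hall, List.count_cons]
          simp only [show ("ABCD".toList.contains 'A') = true from by decide, Bool.true_and]
          simp only [show (('A' : Char) == 'B') = false from by decide,
            show (('A' : Char) == 'C') = false from by decide,
            show (('A' : Char) == 'D') = false from by decide,
            show (('A' : Char) == 'A') = true from by decide, if_true]
          push_cast
          simp only [add_zero]
          omega
        · have hf : (rest.all fun c => "ABCD".toList.contains c) = false := by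
              cases hx : (rest.all fun c => "ABCD".toList.contains c)
              · rfl
              · exact absurd hx hall
          simp only [List.all_cons, hf, Bool.and_false, Bool.false_eq_true, if_false]
      · by_cases hB : c = 'B'
        · subst hB
          rw [pvLoopB, if_neg (by decide), if_pos rfl, ih _ _ _ hna (by omega)]
          by_cases hall : rest.all (fun c => "ABCD".toList.contains c)
          · have hstep := pvH_step nb hnb
            rw [show nb + 1 + (rest.count 'B' : Int) = nb + ((rest.count 'B' : Int) + 1) from by ring] at *
            simp only [List.all_cons, hall, List.count_cons]
            simp only [show ("ABCD".toList.contains 'B') = true from by decide, Bool.true_and]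
            simp only [show (('B' : Char) == 'A') = false from by decide,
              show (('B' : Char) == 'C') = false from by decide,
              show (('B' : Char) == 'D') = false from by decide,
              show (('B' : Char) == 'B') = true from by decide, if_true]
            push_cast
            simp only [add_zero]
            omega
          · have hf : (rest.all fun c => "ABCD".toList.contains c) = false := by
                cases hx : (rest.all fun c => "ABCD".toList.contains c)
                · rfl
                · exact absurd hx hall
            simp only [List.all_cons, hf, Bool.and_false, Bool.false_eq_true, if_false]
        · by_cases hC : c = 'C'
          · subst hC
            rw [pvLoopB, if_neg (by decide), if_neg (by decide), if_pos rfl, ih _ _ _ hna hnb]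
            by_cases hall : rest.all (fun c => "ABCD".toList.contains c)
            · simp only [List.all_cons, hall, List.count_cons]
              simp only [show ("ABCD".toList.contains 'C') = true from by decide, Bool.true_and]
              simp only [show (('C' : Char) == 'A') = false from by decide,
                show (('C' : Char) == 'B') = false from by decide,
                show (('C' : Char) == 'D') = false from by decide,
                show (('C' : Char) == 'C') = true from by decide, if_true]
              push_cast
              simp only [add_zero]
              ring
            · have hf : (rest.all fun c => "ABCD".toList.contains c) = false := by
                  cases hx : (rest.all fun c => "ABCD".toList.contains c)
                  · rfl
                  · exact absurd hx hall
              simp only [List.all_cons, hf, Bool.and_false, Bool.false_eq_true, if_false]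
          · by_cases hD : c = 'D'
            · subst hD
              rw [pvLoopB, if_neg (by decide), if_neg (by decide), if_neg (by decide), if_pos rfl,
                ih _ _ _ hna hnb]
              by_cases hall : rest.all (fun c => "ABCD".toList.contains c)
              · simp only [List.all_cons, hall, List.count_cons]
                simp only [show ("ABCD".toList.contains 'D') = true from by decide, Bool.true_and,
                  if_pos rfl]
                simp only [show (('D' : Char) == 'A') = false from by decide,
                  show (('D' : Char) == 'B') = false from by decide,
                  show (('D' : Char) == 'C') = false from by decide,
                  show (('D' : Char) == 'D') = true from by decide, if_true]
                push_cast
                simp only [add_zero]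
                ring
              · have hf : (rest.all fun c => "ABCD".toList.contains c) = false := by
                    cases hx : (rest.all fun c => "ABCD".toList.contains c)
                    · rfl
                    · exact absurd hx hall
                simp only [List.all_cons, hf, Bool.and_false, Bool.false_eq_true, if_false]
            · have hbad : "ABCD".toList.contains c = false := by
                have h1 : c ∈ "ABCD".toList → False := by
                  intro hm
                  simp only [show "ABCD".toList = ['A','B','C','D'] from rfl, List.mem_cons] at hm
                  rcases hm with h | h | h | h
                  · exact hA h
                  · exact hB h
                  · exact hC h
                  · exact hD (by simpa using h)
                cases hcc : "ABCD".toList.contains c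
                · rfl
                · exact absurd (List.contains_iff_mem.mp hcc) h1
              rw [pvLoopB, if_neg hA, if_neg hB, if_neg hC, if_neg hD]
              rw [if_neg (by simp only [List.all_cons, hbad, Bool.false_and]; simp)]

theorem checklite_spec_aux (skus : String) : checklite skus = checklite_alt skus := by
  unfold checklite checklite_alt
  set l := (PySem.Str.replace (PySem.Str.upper skus) " " "").toList with hl
  rw [pvLoopA_eq, pvLoopB_eq l 0 0 0 le_rfl le_rfl]
  by_cases hall : l.all (fun c => "ABCD".toList.contains c)
  · rw [if_pos hall, if_pos hall]
    simp only [pvGetTotal, PySem.Dict.getD_foldl_modify_add_one, PySem.Dict.getD_empty,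
      zero_add, pvG, pvH,
      show PySem.Int.floordiv 0 3 = 0 from by decide, show PySem.Int.mod 0 3 = 0 from by decide,
      show PySem.Int.floordiv 0 2 = 0 from by decide, show PySem.Int.mod 0 2 = 0 from by decide]
    ring
  · rw [if_neg hall, if_neg hall]

-- ===== VERDICT (by name: the statement is the Claim_ definition above) =====
theorem checklite_spec : Claim_equal_checklite := by
  intro skus _
  exact checklite_spec_aux skus
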